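-- pv_equiv track=rewrite | github.com/JosephOcasio/beyond-seo | aura-governance-hub/tools/ncep.py | is_load_bearing
-- ===== SOURCE A (Python) =====
-- from collections import defaultdict, deque
-- from typing import Dict, Iterable, List, Optional, Sequence, Set, Tuple
--
-- def reachable(g: Dict[str, List[str]], start: str, goal: str, skip_edge: Optional[Tuple[str, str]] = None) -> bool:
--     if start == goal:
--         return True
--     q = deque([start])
--     seen = {start}
--     while q:
--         cur = q.popleft()
--         for nxt in g.get(cur, []):
--             if skip_edge and (cur, nxt) == skip_edge:
--                 continue
--             if nxt == goal:
--                 return True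
--             if nxt in seen:
--                 continue
--             seen.add(nxt)
--             q.append(nxt)
--     return False
--
-- def is_load_bearing(node: str, g: Dict[str, List[str]], rg: Dict[str, List[str]]) -> bool:
--     preds = rg.get(node, [])
--     succs = g.get(node, [])
--     if not preds or not succs:
--         return False
--
--     # Remove node and test if predecessor->successor connectivity depends on node.
--     g2: Dict[str, List[str]] = {}
--     for k, vs in g.items():
--         if k == node:
--             continue
--         g2[k] = [v for v in vs if v != node]
--
--     for p in preds:
--         for s in succs:
--             if not reachable(g2, p, s):
--                 return True
--     return False
-- ===== SOURCE B (Python) =====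
-- def is_load_bearing(node, g, rg):
--     preds = rg.get(node, [])
--     succs = g.get(node, [])
--     if not preds or not succs:
--         return False
--
--     # Reversed node-deleted graph: rg2[v] lists the predecessors of v in g minus node.
--     rg2 = {}
--     for k, vs in g.items():
--         if k == node:
--             continue
--         for v in vs:
--             if v != node:
--                 rg2.setdefault(v, []).append(k)
--
--     # One backward DFS per successor; p reaches s in g2 iff p is backward-reachable from s.
--     for s in succs:
--         back = {s}
--         stack = [s]
--         while stack:
--             cur = stack.pop()
--             for prv in rg2.get(cur, []):
--                 if prv not in back:
--                     back.add(prv)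
--                     stack.append(prv)
--         if any(p not in back for p in preds):
--             return True
--     return False
-- ===== Notes on version B (the rewrite author's own statement) =====
-- stated objective: alternative
-- what changed: B builds the REVERSED node-deleted graph once and runs one backward DFS per successor collecting everything that can reach it, testing each predecessor by set membership, instead of A's goal-targeted forward BFS per (predecessor, successor) pair; O(S*(V+E)) vs A's O(P*S*(V+E)). Pre_ excludes association lists for g with duplicate keys, which cannot arise from a Python dict (A's dict rebuild would keep only the last entry while B's reversal reads all entries).
import Mathlib
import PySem

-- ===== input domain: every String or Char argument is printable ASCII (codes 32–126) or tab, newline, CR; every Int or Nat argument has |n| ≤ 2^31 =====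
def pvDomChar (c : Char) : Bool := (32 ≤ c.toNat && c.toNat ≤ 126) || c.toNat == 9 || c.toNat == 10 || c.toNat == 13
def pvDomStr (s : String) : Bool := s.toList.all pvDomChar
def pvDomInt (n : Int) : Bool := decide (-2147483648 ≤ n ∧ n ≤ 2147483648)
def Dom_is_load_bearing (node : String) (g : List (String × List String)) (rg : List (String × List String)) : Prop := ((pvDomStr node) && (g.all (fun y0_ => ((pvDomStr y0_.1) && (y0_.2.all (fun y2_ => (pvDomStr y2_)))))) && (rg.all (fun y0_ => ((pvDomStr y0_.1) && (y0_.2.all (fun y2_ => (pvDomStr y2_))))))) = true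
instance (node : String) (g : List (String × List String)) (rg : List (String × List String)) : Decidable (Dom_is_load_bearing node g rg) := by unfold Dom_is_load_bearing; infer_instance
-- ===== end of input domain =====

-- B replaces A's goal-targeted forward BFS per (predecessor, successor) pair by building the
-- REVERSED node-deleted graph once and running one backward DFS per successor, testing each
-- predecessor by membership in the backward-reachable set (objective: alternative).

-- Termination bookkeeping shared by both ports' decreasing_by (not part of either algorithm's result):
-- pvCands g2 = the distinct vertices occurring as out-neighbours in g2, pvUnseen = how many are not yet seen.
def pvCands (g2 : PySem.Dict String (List String)) : List String :=
  PySem.List.dedup (g2.items.flatMap (fun kv => kv.2))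

def pvUnseen (g2 : PySem.Dict String (List String)) (seen : PySem.Set String) : Nat :=
  ((pvCands g2).filter (fun v => decide (v ∉ seen))).length

theorem pvFilterLen (l : List String) (hnd : l.Nodup) (a : String) (ha : a ∈ l)
    (p q : String → Bool) (hq : ∀ v, q v = (p v && decide (v ≠ a))) (hpa : p a = true) :
    (l.filter q).length + 1 = (l.filter p).length := by
  induction l with
  | nil => cases ha
  | cons x xs ih =>
    rcases List.nodup_cons.mp hnd with ⟨hx, hxs⟩
    by_cases hax : a = x
    · subst hax
      have hqx : q a = false := by rw [hq]; simp
      have hcong : xs.filter q = xs.filter p := by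
        apply List.filter_congr
        intro v hv
        have hva : v ≠ a := fun h => hx (h ▸ hv)
        rw [hq]; simp [hva]
      simp [hqx, hpa, hcong]
    · have hmem : a ∈ xs := by
        rcases List.mem_cons.mp ha with h | h
        · exact absurd h hax
        · exact h
      have hqx : q x = p x := by
        rw [hq]
        have hxa : x ≠ a := fun h => hax h.symm
        simp [hxa]
      have hrec := ih hxs hmem
      by_cases hp : p x = true
      · simp [hqx, hp]; omega
      · simp only [Bool.not_eq_true] at hp
        simp [hqx, hp, hrec]

theorem pvUnseenAdd (g2 : PySem.Dict String (List String)) (seen : PySem.Set String) (a : String)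
    (ha : a ∈ pvCands g2) (hna : a ∉ seen) :
    pvUnseen g2 (seen.add a) + 1 = pvUnseen g2 seen := by
  apply pvFilterLen _ (PySem.List.nodup_dedup _) a ha
  · intro v
    by_cases h1 : v ∈ seen <;> by_cases h2 : v = a <;>
      simp [PySem.Set.mem_add, h1, h2]
  · simpa using hna

theorem pvAdjSub (g2 : PySem.Dict String (List String)) (cur x : String)
    (hx : x ∈ g2.getD cur []) : x ∈ pvCands g2 := by
  rw [PySem.Dict.getD_eq_get?_getD] at hx
  cases h : g2.get? cur with
  | none => rw [h] at hx; simp at hx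
  | some vs =>
    rw [h] at hx
    simp only [Option.getD_some] at hx
    have hm := PySem.Dict.mem_items_of_get?_eq_some g2 h
    unfold pvCands
    rw [PySem.List.mem_dedup]
    exact List.mem_flatMap.mpr ⟨(cur, vs), hm, hx⟩

-- ===== PORT A =====
-- helper `reachable` : the inner `for nxt in g.get(cur, [])` loop body over state (seen, q),
-- returning (found goal?, seen, q)
def pvReachInner (skip : Option (String × String)) (goal cur : String) :
    List String → PySem.Set String → List String → Bool × PySem.Set String × List String
  | [], seen, q => (false, seen, q)
  | nxt :: rest, seen, q =>
    if (match skip with | some e => (cur, nxt) == e | none => false) then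
      pvReachInner skip goal cur rest seen q
    else if nxt == goal then (true, seen, q)
    else if seen.contains nxt then
      pvReachInner skip goal cur rest seen q
    else
      pvReachInner skip goal cur rest (seen.add nxt) (q ++ [nxt])

theorem pvReachInnerMeasure (g2 : PySem.Dict String (List String))
    (skip : Option (String × String)) (goal cur : String) :
    ∀ (ns : List String) (seen : PySem.Set String) (q : List String),
      (∀ x ∈ ns, x ∈ pvCands g2) →
      (pvReachInner skip goal cur ns seen q).2.2.length
          + pvUnseen g2 (pvReachInner skip goal cur ns seen q).2.1
        ≤ q.length + pvUnseen g2 seen := by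
  intro ns
  induction ns with
  | nil => intro seen q h; simp [pvReachInner]
  | cons nxt rest ih =>
    intro seen q h
    have hrest : ∀ x ∈ rest, x ∈ pvCands g2 := fun x hx => h x (List.mem_cons_of_mem _ hx)
    have hn : nxt ∈ pvCands g2 := h nxt List.mem_cons_self
    unfold pvReachInner
    cases hB : (match skip with | some e => (cur, nxt) == e | none => false) with
    | true =>
      rw [if_pos rfl]
      exact ih seen q hrest
    | false =>
      rw [if_neg (by simp)]
      split
      · simp
      · split
        · exact ih seen q hrest
        · rename_i hc
          have hna : nxt ∉ seen := fun hm => hc ((PySem.Set.contains_iff seen nxt).mpr hm)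
          have hkey := pvUnseenAdd g2 seen nxt hn hna
          have hrec := ih (seen.add nxt) (q ++ [nxt]) hrest
          simp only [List.length_append, List.length_cons, List.length_nil] at hrec ⊢
          omega

-- the `while q:` loop of `reachable`
def pvReachLoop (g2 : PySem.Dict String (List String)) (skip : Option (String × String))
    (goal : String) : PySem.Set String → List String → Bool
  | _, [] => false
  | seen, cur :: rest =>
    let r := pvReachInner skip goal cur (g2.getD cur []) seen rest
    if r.1 then true
    else pvReachLoop g2 skip goal r.2.1 r.2.2
termination_by seen q => q.length + pvUnseen g2 seen
decreasing_by
  have hm := pvReachInnerMeasure g2 skip goal cur (g2.getD cur []) seen rest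
      (fun x hx => pvAdjSub g2 cur x hx)
  simp only [List.length_cons]
  omega

def pvReachable (g2 : PySem.Dict String (List String)) (start goal : String)
    (skip : Option (String × String)) : Bool :=
  if start == goal then true
  else pvReachLoop g2 skip goal (PySem.Set.add PySem.Set.empty start) [start]

def is_load_bearing (node : String) (g : List (String × List String)) (rg : List (String × List String)) : Bool :=
  let gd : PySem.Dict String (List String) := PySem.Dict.mk g
  let preds := (PySem.Dict.mk rg).getD node []
  let succs := gd.getD node []
  if preds.isEmpty || succs.isEmpty then false
  else
    let g2 := gd.items.foldl
      (fun acc kv => if kv.1 == node then acc else acc.insert kv.1 (kv.2.filter (fun v => v != node)))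
      (PySem.Dict.mk [])
    preds.any (fun p => succs.any (fun s => !(pvReachable g2 p s none)))

-- ===== PORT B =====
-- the `rg2.setdefault(v, []).append(k)` double loop building the reversed node-deleted graph
def pvRev (node : String) (items : List (String × List String)) : PySem.Dict String (List String) :=
  items.foldl
    (fun acc kv =>
      if kv.1 == node then acc
      else kv.2.foldl
        (fun a v => if v != node then a.insert v (a.getD v [] ++ [kv.1]) else a) acc)
    (PySem.Dict.mk [])

-- the `for prv in rg2.get(cur, [])` body of B's backward DFS over state (back, stack)
def pvDfsInner : List String → PySem.Set String → List String → PySem.Set String × List String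
  | [], back, stack => (back, stack)
  | prv :: rest, back, stack =>
    if back.contains prv then pvDfsInner rest back stack
    else pvDfsInner rest (back.add prv) (prv :: stack)

theorem pvDfsInnerMeasure (g2 : PySem.Dict String (List String)) :
    ∀ (ns : List String) (back : PySem.Set String) (stack : List String),
      (∀ x ∈ ns, x ∈ pvCands g2) →
      (pvDfsInner ns back stack).2.length + pvUnseen g2 (pvDfsInner ns back stack).1
        ≤ stack.length + pvUnseen g2 back := by
  intro ns
  induction ns with
  | nil => intro back stack h; simp [pvDfsInner]
  | cons prv rest ih =>
    intro back stack h
    have hrest : ∀ x ∈ rest, x ∈ pvCands g2 := fun x hx => h x (List.mem_cons_of_mem _ hx)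
    have hn : prv ∈ pvCands g2 := h prv List.mem_cons_self
    unfold pvDfsInner
    split
    · exact ih back stack hrest
    · rename_i hc
      have hna : prv ∉ back := fun hm => hc ((PySem.Set.contains_iff back prv).mpr hm)
      have hkey := pvUnseenAdd g2 back prv hn hna
      have hrec := ih (back.add prv) (prv :: stack) hrest
      simp only [List.length_cons] at hrec ⊢
      omega

-- the `while stack:` loop of B, returning the final `back`
def pvDfsLoop (g2 : PySem.Dict String (List String)) :
    PySem.Set String → List String → PySem.Set String
  | back, [] => back
  | back, cur :: rest =>
    let r := pvDfsInner (g2.getD cur []) back rest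
    pvDfsLoop g2 r.1 r.2
termination_by back stack => stack.length + pvUnseen g2 back
decreasing_by
  have hm := pvDfsInnerMeasure g2 (g2.getD cur []) back rest
      (fun x hx => pvAdjSub g2 cur x hx)
  simp only [List.length_cons]
  omega

def is_load_bearing_alt (node : String) (g : List (String × List String)) (rg : List (String × List String)) : Bool :=
  let gd : PySem.Dict String (List String) := PySem.Dict.mk g
  let preds := (PySem.Dict.mk rg).getD node []
  let succs := gd.getD node []
  if preds.isEmpty || succs.isEmpty then false
  else
    let rg2 := pvRev node gd.items
    succs.any (fun s =>
      let back := pvDfsLoop rg2 (PySem.Set.add PySem.Set.empty s) [s]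
      preds.any (fun p => !(back.contains p)))

-- ===== PRECONDITION & SPEC =====
-- Pre_ excludes association lists for g with duplicate keys: a Python dict cannot have them,
-- and on such lists A's dict rebuild keeps only the last entry per key while B's reversal reads
-- all entries, so they represent no Python input A returns on.
def Pre_is_load_bearing (node : String) (g : List (String × List String)) (rg : List (String × List String)) : Prop :=
  (g.map Prod.fst).Nodup
instance (node : String) (g : List (String × List String)) (rg : List (String × List String)) : Decidable (Pre_is_load_bearing node g rg) := by unfold Pre_is_load_bearing; infer_instance

def pvWitness_is_load_bearing : String × (List (String × List String)) × (List (String × List String)) :=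
  ("n", [("a", ["n"]), ("n", ["b"])], [("n", ["a"])])

def Spec_is_load_bearing (node : String) (g : List (String × List String)) (rg : List (String × List String)) (out : Bool) : Prop := out = is_load_bearing_alt node g rg
instance (node : String) (g : List (String × List String)) (rg : List (String × List String)) (out : Bool) : Decidable (Spec_is_load_bearing node g rg out) := by unfold Spec_is_load_bearing; infer_instance

-- ===== CLAIM (what is proved, stated in full; the proofs are below) =====
def Claim_equal_is_load_bearing : Prop := ∀ (node : String) (g : List (String × List String)) (rg : List (String × List String)), Dom_is_load_bearing node g rg → Pre_is_load_bearing node g rg → Spec_is_load_bearing node g rg (is_load_bearing node g rg)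

-- ===== LEMMAS AND PROOFS =====

-- edges of the node-deleted graph, characterised directly on the item list
def pvE (node : String) (items : List (String × List String)) (y x : String) : Prop :=
  ∃ vs, (y, vs) ∈ items ∧ y ≠ node ∧ x ∈ vs ∧ x ≠ node

-- reachability (edge = membership in the adjacency list)
def pvEdge (g2 : PySem.Dict String (List String)) (x y : String) : Prop :=
  y ∈ g2.getD x ([] : List String)

def pvReach (g2 : PySem.Dict String (List String)) : String → String → Prop :=
  Relation.ReflTransGen (pvEdge g2)

-- with nodup keys, a key determines its value
theorem pvKeyUnique (l : List (String × List String)) (hnd : (l.map Prod.fst).Nodup)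
    (y : String) (a b : List String) (ha : (y, a) ∈ l) (hb : (y, b) ∈ l) : a = b := by
  induction l with
  | nil => cases ha
  | cons kv rest ih =>
    rw [List.map_cons, List.nodup_cons] at hnd
    rcases List.mem_cons.mp ha with h1 | h1 <;> rcases List.mem_cons.mp hb with h2 | h2
    · exact congrArg Prod.snd (h1.trans h2.symm)
    · exact absurd (List.mem_map.mpr ⟨(y, b), h2, by rw [← h1]⟩) hnd.1
    · exact absurd (List.mem_map.mpr ⟨(y, a), h1, by rw [← h2]⟩) hnd.1
    · exact ih hnd.2 h1 h2

-- A's g2 fold: lookup characterisation (needs nodup keys)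
theorem pvG2get (node : String) (l : List (String × List String))
    (hnd : (l.map Prod.fst).Nodup) (acc : PySem.Dict String (List String)) (y : String) :
    (l.foldl (fun acc kv => if kv.1 == node then acc
        else acc.insert kv.1 (kv.2.filter (fun v => v != node))) acc).get? y =
      (match l.find? (fun kv => kv.1 == y) with
       | none => acc.get? y
       | some kv => if y = node then acc.get? y
                    else some (kv.2.filter (fun v => v != node))) := by
  induction l generalizing acc with
  | nil => simp
  | cons kv rest ih =>
    rw [List.map_cons, List.nodup_cons] at hnd
    have hnone : kv.1 ∉ rest.map Prod.fst → rest.find? (fun kv' => kv'.1 == kv.1) = none := by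
      intro h
      rw [List.find?_eq_none]
      intro x hx
      simp only [beq_iff_eq]
      exact fun he => h (List.mem_map.mpr ⟨x, hx, he⟩)
    by_cases hk : kv.1 = y
    · subst hk
      have hfindrest := hnone hnd.1
      rw [List.foldl_cons, ih hnd.2]
      rw [List.find?_cons_of_pos (by simp)]
      by_cases hyn : kv.1 = node
      · simp only [if_pos hyn, hfindrest]
        rw [if_pos (by simp [hyn])]
      · simp only [if_neg hyn, hfindrest]
        rw [if_neg (by simp [hyn]), PySem.Dict.get?_insert_self]
    · rw [List.foldl_cons, ih hnd.2]
      rw [List.find?_cons_of_neg (by simp [hk])]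
      have hacc : (if kv.1 == node then acc
          else acc.insert kv.1 (kv.2.filter (fun v => v != node))).get? y = acc.get? y := by
        split
        · rfl
        · rw [PySem.Dict.get?_insert, if_neg (fun h => hk h.symm)]
      cases rest.find? (fun kv' => kv'.1 == y) with
      | none => exact hacc
      | some kv' => rw [hacc]

-- A's g2 fold: edge characterisation
theorem pvG2Edge (node : String) (l : List (String × List String))
    (hnd : (l.map Prod.fst).Nodup) (y x : String) :
    pvEdge (l.foldl (fun acc kv => if kv.1 == node then acc
        else acc.insert kv.1 (kv.2.filter (fun v => v != node))) (PySem.Dict.mk []))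
      y x ↔ pvE node l y x := by
  have h0 : ∀ z, ((PySem.Dict.mk ([] : List (String × List String))).get? z).getD [] = [] := fun _ => rfl
  unfold pvEdge
  rw [PySem.Dict.getD_eq_get?_getD, pvG2get node l hnd _ y]
  cases hf : l.find? (fun kv => kv.1 == y) with
  | none =>
    rw [List.find?_eq_none] at hf
    change x ∈ (((PySem.Dict.mk ([] : List (String × List String))).get? y).getD []) ↔ pvE node l y x
    rw [h0 y]
    simp only [List.not_mem_nil, false_iff]
    rintro ⟨vs, hmem, -, -, -⟩
    exact absurd (by simp : (((y, vs)).1 == y) = true) (hf _ hmem)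
  | some kv =>
    have hkv : kv.1 = y := by simpa using List.find?_some hf
    have hmemkv : kv ∈ l := List.mem_of_find?_eq_some hf
    subst hkv
    change x ∈ ((if kv.1 = node then ((PySem.Dict.mk ([] : List (String × List String))).get? kv.1)
        else some (List.filter (fun v => v != node) kv.2)).getD []) ↔ pvE node l kv.1 x
    by_cases hyn : kv.1 = node
    · rw [if_pos hyn, h0 kv.1]
      simp only [List.not_mem_nil, false_iff]
      rintro ⟨vs, -, hne, -, -⟩
      exact hne hyn
    · simp only [if_neg hyn, Option.getD_some, List.mem_filter, bne_iff_ne, ne_eq]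
      constructor
      · rintro ⟨hx, hxn⟩
        exact ⟨kv.2, by simpa using hmemkv, hyn, hx, by simpa using hxn⟩
      · rintro ⟨vs, hmem, -, hx, hxn⟩
        have hvs : vs = kv.2 := pvKeyUnique l hnd kv.1 vs kv.2 hmem (by simpa using hmemkv)
        subst hvs
        exact ⟨hx, by simpa using hxn⟩

-- B's reversal, inner loop over one adjacency list with fixed key k
theorem pvRevInner (node k : String) (vs : List String)
    (acc : PySem.Dict String (List String)) (x y : String) :
    y ∈ (vs.foldl (fun a v => if v != node then a.insert v (a.getD v [] ++ [k]) else a)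
        acc).getD x [] ↔
      y ∈ acc.getD x [] ∨ (y = k ∧ x ∈ vs ∧ x ≠ node) := by
  induction vs generalizing acc with
  | nil => simp
  | cons v rest ih =>
    rw [List.foldl_cons]
    by_cases hv : v = node
    · rw [if_neg (by simp [hv]), ih]
      constructor
      · rintro (h | ⟨h1, h2, h3⟩)
        · exact Or.inl h
        · exact Or.inr ⟨h1, List.mem_cons_of_mem _ h2, h3⟩
      · rintro (h | ⟨h1, h2, h3⟩)
        · exact Or.inl h
        · rcases List.mem_cons.mp h2 with h | h
          · exact absurd (h.trans hv) h3
          · exact Or.inr ⟨h1, h, h3⟩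
    · rw [if_pos (by simp [hv]), ih, PySem.Dict.getD_insert]
      by_cases hxv : x = v
      · rw [if_pos hxv]
        subst hxv
        rw [List.mem_append, List.mem_singleton]
        constructor
        · rintro ((h | h) | ⟨h1, h2, h3⟩)
          · exact Or.inl h
          · exact Or.inr ⟨h, List.mem_cons_self, hv⟩
          · exact Or.inr ⟨h1, List.mem_cons_of_mem _ h2, h3⟩
        · rintro (h | ⟨h1, _, _⟩)
          · exact Or.inl (Or.inl h)
          · exact Or.inl (Or.inr h1)
      · rw [if_neg hxv]
        constructor
        · rintro (h | ⟨h1, h2, h3⟩)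
          · exact Or.inl h
          · exact Or.inr ⟨h1, List.mem_cons_of_mem _ h2, h3⟩
        · rintro (h | ⟨h1, h2, h3⟩)
          · exact Or.inl h
          · rcases List.mem_cons.mp h2 with h | h
            · exact absurd h hxv
            · exact Or.inr ⟨h1, h, h3⟩

-- B's reversal fold: edge characterisation (no nodup needed)
theorem pvRevFold (node : String) (l : List (String × List String))
    (acc : PySem.Dict String (List String)) (x y : String) :
    y ∈ (l.foldl (fun acc kv => if kv.1 == node then acc
        else kv.2.foldl (fun a v => if v != node then a.insert v (a.getD v [] ++ [kv.1]) else a)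
          acc) acc).getD x [] ↔
      y ∈ acc.getD x [] ∨ pvE node l y x := by
  induction l generalizing acc with
  | nil => simp [pvE]
  | cons kv rest ih =>
    rw [List.foldl_cons]
    by_cases hk : kv.1 = node
    · rw [if_pos (by simp [hk]), ih]
      unfold pvE
      constructor
      · rintro (h | ⟨vs, h1, h2, h3, h4⟩)
        · exact Or.inl h
        · exact Or.inr ⟨vs, List.mem_cons_of_mem _ h1, h2, h3, h4⟩
      · rintro (h | ⟨vs, h1, h2, h3, h4⟩)
        · exact Or.inl h
        · rcases List.mem_cons.mp h1 with h' | h'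
          · exact absurd ((congrArg Prod.fst h').trans hk) h2
          · exact Or.inr ⟨vs, h', h2, h3, h4⟩
    · rw [if_neg (by simp [hk]), ih, pvRevInner]
      unfold pvE
      constructor
      · rintro ((h | ⟨h1, h2, h3⟩) | ⟨vs, h1, h2, h3, h4⟩)
        · exact Or.inl h
        · exact Or.inr ⟨kv.2, List.mem_cons.mpr (Or.inl (by rw [h1])),
            h1 ▸ hk, h2, h3⟩
        · exact Or.inr ⟨vs, List.mem_cons_of_mem _ h1, h2, h3, h4⟩
      · rintro (h | ⟨vs, h1, h2, h3, h4⟩)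
        · exact Or.inl (Or.inl h)
        · rcases List.mem_cons.mp h1 with h' | h'
          · have hy : y = kv.1 := congrArg Prod.fst h'
            have hvs : vs = kv.2 := congrArg Prod.snd h'
            exact Or.inl (Or.inr ⟨hy, hvs ▸ h3, h4⟩)
          · exact Or.inr ⟨vs, h', h2, h3, h4⟩

theorem pvRevEdge (node : String) (l : List (String × List String)) (x y : String) :
    pvEdge (pvRev node l) x y ↔ pvE node l y x := by
  have h0 : (PySem.Dict.mk ([] : List (String × List String))).getD x [] = [] := rfl
  unfold pvRev pvEdge
  rw [pvRevFold, h0]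
  simp

-- A's inner loop finds the goal iff the goal is among cur's neighbours
theorem pvReachInnerFound (goal cur : String) :
    ∀ (ns : List String) (seen : PySem.Set String) (q : List String),
      ((pvReachInner none goal cur ns seen q).1 = true ↔ goal ∈ ns) := by
  intro ns
  induction ns with
  | nil => intro seen q; simp [pvReachInner]
  | cons nxt rest ih =>
    intro seen q
    unfold pvReachInner
    rw [if_neg (by simp)]
    by_cases hg : nxt == goal
    · rw [if_pos hg]
      have hgn : goal = nxt := (beq_iff_eq.mp hg).symm
      simp [hgn]
    · rw [if_neg hg]
      have hgn : goal ≠ nxt := fun h => hg (by simp [h])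
      split
      · rw [ih seen q, List.mem_cons]
        simp [hgn]
      · rw [ih (seen.add nxt) (q ++ [nxt]), List.mem_cons]
        simp [hgn]

-- A's inner loop, when the goal is not among the neighbours: what (seen, q) become
theorem pvReachInnerState (goal cur : String) :
    ∀ (ns : List String) (seen : PySem.Set String) (q : List String), goal ∉ ns →
      ((∀ y, y ∈ (pvReachInner none goal cur ns seen q).2.1 ↔ (y ∈ seen ∨ y ∈ ns)) ∧
       (∀ x, x ∈ (pvReachInner none goal cur ns seen q).2.2 ↔
          (x ∈ q ∨ (x ∈ (pvReachInner none goal cur ns seen q).2.1 ∧ x ∉ seen)))) := by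
  intro ns
  induction ns with
  | nil =>
    intro seen q _
    constructor
    · intro y; simp [pvReachInner]
    · intro x; simp [pvReachInner]
  | cons nxt rest ih =>
    intro seen q hg
    have hgn : goal ≠ nxt := fun h => hg (h ▸ List.mem_cons_self)
    have hgr : goal ∉ rest := fun h => hg (List.mem_cons_of_mem _ h)
    unfold pvReachInner
    rw [if_neg (by simp)]
    rw [if_neg (fun h => hgn (beq_iff_eq.mp h).symm)]
    split
    · rename_i hc
      have hcm : nxt ∈ seen := (PySem.Set.contains_iff seen nxt).mp hc
      obtain ⟨ha', hb'⟩ := ih seen q hgr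
      constructor
      · intro y
        rw [ha' y, List.mem_cons]
        constructor
        · rintro (h | h)
          · exact Or.inl h
          · exact Or.inr (Or.inr h)
        · rintro (h | h | h)
          · exact Or.inl h
          · exact Or.inl (h ▸ hcm)
          · exact Or.inr h
      · exact hb'
    · rename_i hc
      have hna : nxt ∉ seen := fun hm => hc ((PySem.Set.contains_iff seen nxt).mpr hm)
      obtain ⟨ha', hb'⟩ := ih (seen.add nxt) (q ++ [nxt]) hgr
      constructor
      · intro y
        rw [ha' y, PySem.Set.mem_add, List.mem_cons]
        tauto
      · intro x
        rw [hb' x, ha' x, List.mem_append, List.mem_singleton, PySem.Set.mem_add]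
        by_cases h1 : x = nxt
        · subst h1
          by_cases h2 : x ∈ seen
          · exact absurd h2 hna
          · tauto
        · by_cases h2 : x ∈ seen <;> tauto

-- soundness: if A's BFS loop answers true, some reachable vertex has the goal as neighbour
theorem pvReachLoopTrue (g2 : PySem.Dict String (List String)) (goal p : String) :
    ∀ (seen : PySem.Set String) (q : List String),
      (∀ x ∈ q, pvReach g2 p x) →
      pvReachLoop g2 none goal seen q = true →
      ∃ u, pvReach g2 p u ∧ pvEdge g2 u goal := by
  intro seen q
  induction seen, q using pvReachLoop.induct g2 none goal with
  | case1 seen =>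
    intro _ h
    rw [pvReachLoop] at h
    cases h
  | case2 seen cur rest r hf =>
    intro hq _
    have hgoal : goal ∈ g2.getD cur [] := (pvReachInnerFound goal cur _ seen rest).mp hf
    exact ⟨cur, hq cur List.mem_cons_self, hgoal⟩
  | case3 seen cur rest r hf ih =>
    intro hq hloop
    have hf' : ¬(pvReachInner none goal cur (g2.getD cur []) seen rest).1 = true := hf
    rw [pvReachLoop] at hloop
    simp only [if_neg hf'] at hloop
    have hgr : goal ∉ g2.getD cur [] :=
      fun h => hf ((pvReachInnerFound goal cur _ seen rest).mpr h)
    obtain ⟨ha', hb'⟩ := pvReachInnerState goal cur (g2.getD cur []) seen rest hgr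
    apply ih _ hloop
    intro x hx
    rcases (hb' x).mp hx with h | ⟨h1, h2⟩
    · exact hq x (List.mem_cons_of_mem _ h)
    · rcases (ha' x).mp h1 with h | h
      · exact absurd h h2
      · exact Relation.ReflTransGen.tail (hq cur List.mem_cons_self) h

-- completeness: if A's BFS loop answers false, `seen` extends to a goal-free closed set S
theorem pvReachLoopFalse (g2 : PySem.Dict String (List String)) (goal : String) :
    ∀ (seen : PySem.Set String) (q : List String),
      pvReachLoop g2 none goal seen q = false →
      (∀ x ∈ seen, x ∉ q → goal ∉ g2.getD x [] ∧ ∀ y ∈ g2.getD x [], y ∈ seen) →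
      (∀ x ∈ q, x ∈ seen) →
      ∃ S : List String, (∀ x ∈ seen, x ∈ S) ∧
        ∀ x ∈ S, goal ∉ g2.getD x [] ∧ ∀ y ∈ g2.getD x [], y ∈ S := by
  intro seen q
  induction seen, q using pvReachLoop.induct g2 none goal with
  | case1 seen =>
    intro _ hInv _
    exact ⟨seen, fun x h => h, fun x hx => hInv x hx (by simp)⟩
  | case2 seen cur rest r hf =>
    intro hloop _ _
    have hf' : (pvReachInner none goal cur (g2.getD cur []) seen rest).1 = true := hf
    rw [pvReachLoop] at hloop
    simp only [if_pos hf'] at hloop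
    cases hloop
  | case3 seen cur rest r hf ih =>
    intro hloop hInv hsub
    have hf' : ¬(pvReachInner none goal cur (g2.getD cur []) seen rest).1 = true := hf
    rw [pvReachLoop] at hloop
    simp only [if_neg hf'] at hloop
    have hgr : goal ∉ g2.getD cur [] :=
      fun h => hf ((pvReachInnerFound goal cur _ seen rest).mpr h)
    obtain ⟨ha', hb'⟩ := pvReachInnerState goal cur (g2.getD cur []) seen rest hgr
    have hInv' : ∀ x ∈ (pvReachInner none goal cur (g2.getD cur []) seen rest).2.1,
        x ∉ (pvReachInner none goal cur (g2.getD cur []) seen rest).2.2 →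
        goal ∉ g2.getD x [] ∧ ∀ y ∈ g2.getD x [],
          y ∈ (pvReachInner none goal cur (g2.getD cur []) seen rest).2.1 := by
      intro x hx hxq
      rcases (ha' x).mp hx with hxs | hxn
      · by_cases hxcur : x = cur
        · subst hxcur
          exact ⟨hgr, fun y hy => (ha' y).mpr (Or.inr hy)⟩
        · by_cases hxrest : x ∈ rest
          · exact absurd ((hb' x).mpr (Or.inl hxrest)) hxq
          · have hxnotq : x ∉ cur :: rest := by
              intro h
              rcases List.mem_cons.mp h with h | h
              · exact hxcur h
              · exact hxrest h
            obtain ⟨h1, h2⟩ := hInv x hxs hxnotq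
            exact ⟨h1, fun y hy => (ha' y).mpr (Or.inl (h2 y hy))⟩
      · by_cases hxs : x ∈ seen
        · by_cases hxcur : x = cur
          · subst hxcur
            exact ⟨hgr, fun y hy => (ha' y).mpr (Or.inr hy)⟩
          · by_cases hxrest : x ∈ rest
            · exact absurd ((hb' x).mpr (Or.inl hxrest)) hxq
            · have hxnotq : x ∉ cur :: rest := by
                intro h
                rcases List.mem_cons.mp h with h | h
                · exact hxcur h
                · exact hxrest h
              obtain ⟨h1, h2⟩ := hInv x hxs hxnotq
              exact ⟨h1, fun y hy => (ha' y).mpr (Or.inl (h2 y hy))⟩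
        · exact absurd ((hb' x).mpr (Or.inr ⟨hx, hxs⟩)) hxq
    have hsub' : ∀ x ∈ (pvReachInner none goal cur (g2.getD cur []) seen rest).2.2,
        x ∈ (pvReachInner none goal cur (g2.getD cur []) seen rest).2.1 := by
      intro x hx
      rcases (hb' x).mp hx with h | ⟨h1, _⟩
      · exact (ha' x).mpr (Or.inl (hsub x (List.mem_cons_of_mem _ h)))
      · exact h1
    obtain ⟨S, hS1, hS2⟩ := ih hloop hInv' hsub'
    exact ⟨S, fun x hx => hS1 x ((ha' x).mpr (Or.inl hx)), hS2⟩

-- B's inner loop: what (back, stack) become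
theorem pvDfsInnerState :
    ∀ (ns : List String) (back : PySem.Set String) (stack : List String),
      ((∀ y, y ∈ (pvDfsInner ns back stack).1 ↔ (y ∈ back ∨ y ∈ ns)) ∧
       (∀ x, x ∈ (pvDfsInner ns back stack).2 ↔
          (x ∈ stack ∨ (x ∈ (pvDfsInner ns back stack).1 ∧ x ∉ back)))) := by
  intro ns
  induction ns with
  | nil =>
    intro back stack
    constructor
    · intro y; simp [pvDfsInner]
    · intro x; simp [pvDfsInner]
  | cons prv rest ih =>
    intro back stack
    unfold pvDfsInner
    split
    · rename_i hc
      have hcm : prv ∈ back := (PySem.Set.contains_iff back prv).mp hc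
      obtain ⟨ha', hb'⟩ := ih back stack
      constructor
      · intro y
        rw [ha' y, List.mem_cons]
        constructor
        · rintro (h | h)
          · exact Or.inl h
          · exact Or.inr (Or.inr h)
        · rintro (h | h | h)
          · exact Or.inl h
          · exact Or.inl (h ▸ hcm)
          · exact Or.inr h
      · exact hb'
    · rename_i hc
      have hna : prv ∉ back := fun hm => hc ((PySem.Set.contains_iff back prv).mpr hm)
      obtain ⟨ha', hb'⟩ := ih (back.add prv) (prv :: stack)
      constructor
      · intro y
        rw [ha' y, PySem.Set.mem_add, List.mem_cons]
        tauto
      · intro x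
        rw [hb' x, ha' x, List.mem_cons, PySem.Set.mem_add]
        by_cases h1 : x = prv
        · subst h1
          by_cases h2 : x ∈ back
          · exact absurd h2 hna
          · tauto
        · by_cases h2 : x ∈ back <;> tauto

-- soundness: everything B's DFS collects is reachable from p
theorem pvDfsLoopSound (g2 : PySem.Dict String (List String)) (p : String) :
    ∀ (back : PySem.Set String) (stack : List String),
      (∀ x ∈ back, pvReach g2 p x) → (∀ x ∈ stack, pvReach g2 p x) →
      ∀ x ∈ pvDfsLoop g2 back stack, pvReach g2 p x := by
  intro back stack
  induction back, stack using pvDfsLoop.induct g2 with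
  | case1 back =>
    intro hseen _
    rw [pvDfsLoop]
    exact hseen
  | case2 back cur rest r ih =>
    intro hseen hstack
    rw [pvDfsLoop]
    obtain ⟨ha', hb'⟩ := pvDfsInnerState (g2.getD cur []) back rest
    apply ih
    · intro x hx
      rcases (ha' x).mp hx with h | h
      · exact hseen x h
      · exact Relation.ReflTransGen.tail (hstack cur List.mem_cons_self) h
    · intro x hx
      rcases (hb' x).mp hx with h | ⟨h1, h2⟩
      · exact hstack x (List.mem_cons_of_mem _ h)
      · rcases (ha' x).mp h1 with h | h
        · exact absurd h h2
        · exact Relation.ReflTransGen.tail (hstack cur List.mem_cons_self) h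

-- completeness: B's final `back` contains the start set and is closed under edges
theorem pvDfsLoopClosed (g2 : PySem.Dict String (List String)) :
    ∀ (back : PySem.Set String) (stack : List String),
      (∀ x ∈ back, x ∉ stack → ∀ y ∈ g2.getD x [], y ∈ back) →
      (∀ x ∈ stack, x ∈ back) →
      (∀ x ∈ back, x ∈ pvDfsLoop g2 back stack) ∧
        (∀ x ∈ pvDfsLoop g2 back stack, ∀ y ∈ g2.getD x [], y ∈ pvDfsLoop g2 back stack) := by
  intro back stack
  induction back, stack using pvDfsLoop.induct g2 with
  | case1 back =>
    intro hInv _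
    rw [pvDfsLoop]
    exact ⟨fun x h => h, fun x hx => hInv x hx (by simp)⟩
  | case2 back cur rest r ih =>
    intro hInv hsub
    rw [pvDfsLoop]
    obtain ⟨ha', hb'⟩ := pvDfsInnerState (g2.getD cur []) back rest
    have hInv' : ∀ x ∈ (pvDfsInner (g2.getD cur []) back rest).1,
        x ∉ (pvDfsInner (g2.getD cur []) back rest).2 →
        ∀ y ∈ g2.getD x [], y ∈ (pvDfsInner (g2.getD cur []) back rest).1 := by
      intro x hx hxq
      rcases (ha' x).mp hx with hxs | hxn
      · by_cases hxcur : x = cur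
        · subst hxcur
          exact fun y hy => (ha' y).mpr (Or.inr hy)
        · by_cases hxrest : x ∈ rest
          · exact absurd ((hb' x).mpr (Or.inl hxrest)) hxq
          · have hxnotq : x ∉ cur :: rest := by
              intro h
              rcases List.mem_cons.mp h with h | h
              · exact hxcur h
              · exact hxrest h
            exact fun y hy => (ha' y).mpr (Or.inl (hInv x hxs hxnotq y hy))
      · by_cases hxs : x ∈ back
        · by_cases hxcur : x = cur
          · subst hxcur
            exact fun y hy => (ha' y).mpr (Or.inr hy)
          · by_cases hxrest : x ∈ rest
            · exact absurd ((hb' x).mpr (Or.inl hxrest)) hxq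
            · have hxnotq : x ∉ cur :: rest := by
                intro h
                rcases List.mem_cons.mp h with h | h
                · exact hxcur h
                · exact hxrest h
              exact fun y hy => (ha' y).mpr (Or.inl (hInv x hxs hxnotq y hy))
        · exact absurd ((hb' x).mpr (Or.inr ⟨hx, hxs⟩)) hxq
    have hsub' : ∀ x ∈ (pvDfsInner (g2.getD cur []) back rest).2,
        x ∈ (pvDfsInner (g2.getD cur []) back rest).1 := by
      intro x hx
      rcases (hb' x).mp hx with h | ⟨h1, _⟩
      · exact (ha' x).mpr (Or.inl (hsub x (List.mem_cons_of_mem _ h)))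
      · exact h1
    obtain ⟨hgrow, hclosed⟩ := ih hInv' hsub'
    exact ⟨fun x hx => hgrow x ((ha' x).mpr (Or.inl hx)), hclosed⟩

-- B's DFS set is exactly reachability from p
theorem pvDfsLoopReach (g2 : PySem.Dict String (List String)) (p s : String) :
    s ∈ pvDfsLoop g2 (PySem.Set.add PySem.Set.empty p) [p] ↔ pvReach g2 p s := by
  have hmem0 : ∀ x, x ∈ PySem.Set.add PySem.Set.empty p ↔ x = p := by
    intro x
    rw [PySem.Set.mem_add]
    simp [PySem.Set.empty]
  constructor
  · intro h
    apply pvDfsLoopSound g2 p _ _ _ _ _ h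
    · intro x hx
      rw [hmem0 x] at hx
      exact hx ▸ Relation.ReflTransGen.refl
    · intro x hx
      rcases List.mem_singleton.mp hx with rfl
      exact Relation.ReflTransGen.refl
  · intro h
    have hInv0 : ∀ x ∈ PySem.Set.add PySem.Set.empty p, x ∉ [p] →
        ∀ y ∈ g2.getD x [], y ∈ PySem.Set.add PySem.Set.empty p := by
      intro x hx hxq
      rw [hmem0 x] at hx
      exact absurd (hx ▸ List.mem_singleton.mpr rfl) hxq
    have hsub0 : ∀ x ∈ [p], x ∈ PySem.Set.add PySem.Set.empty p := by
      intro x hx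
      rcases List.mem_singleton.mp hx with rfl
      exact (hmem0 x).mpr rfl
    obtain ⟨hgrow, hclosed⟩ := pvDfsLoopClosed g2 (PySem.Set.add PySem.Set.empty p) [p] hInv0 hsub0
    have hp : p ∈ pvDfsLoop g2 (PySem.Set.add PySem.Set.empty p) [p] :=
      hgrow p ((hmem0 p).mpr rfl)
    induction h with
    | refl => exact hp
    | tail hbc h ih => exact hclosed _ ih _ h

-- A's `reachable` decides reachability from p
theorem pvReachableIff (g2 : PySem.Dict String (List String)) (p s : String) :
    pvReachable g2 p s none = true ↔ pvReach g2 p s := by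
  have hmem0 : ∀ x, x ∈ PySem.Set.add PySem.Set.empty p ↔ x = p := by
    intro x
    rw [PySem.Set.mem_add]
    simp [PySem.Set.empty]
  unfold pvReachable
  by_cases hps : p == s
  · have hpe : p = s := beq_iff_eq.mp hps
    subst hpe
    rw [if_pos hps]
    exact iff_of_true rfl Relation.ReflTransGen.refl
  · rw [if_neg hps]
    have hpne : p ≠ s := fun h => hps (by simp [h])
    constructor
    · intro h
      obtain ⟨u, hu, he⟩ := pvReachLoopTrue g2 s p _ [p]
        (by
          intro x hx
          rcases List.mem_singleton.mp hx with rfl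
          exact Relation.ReflTransGen.refl) h
      exact Relation.ReflTransGen.tail hu he
    · intro h
      by_contra hf
      have hfalse : pvReachLoop g2 none s (PySem.Set.add PySem.Set.empty p) [p] = false :=
        Bool.eq_false_iff.mpr hf
      have hInv0 : ∀ x ∈ PySem.Set.add PySem.Set.empty p, x ∉ [p] →
          s ∉ g2.getD x [] ∧ ∀ y ∈ g2.getD x [], y ∈ PySem.Set.add PySem.Set.empty p := by
        intro x hx hxq
        rw [hmem0 x] at hx
        exact absurd (hx ▸ List.mem_singleton.mpr rfl) hxq
      have hsub0 : ∀ x ∈ [p], x ∈ PySem.Set.add PySem.Set.empty p := by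
        intro x hx
        rcases List.mem_singleton.mp hx with rfl
        exact (hmem0 x).mpr rfl
      obtain ⟨S, hS1, hS2⟩ := pvReachLoopFalse g2 s _ [p] hfalse hInv0 hsub0
      have hpS : p ∈ S := hS1 p ((hmem0 p).mpr rfl)
      have hReachS : ∀ u, pvReach g2 p u → u ∈ S := by
        intro u hu
        induction hu with
        | refl => exact hpS
        | tail hbc h ih => exact (hS2 _ ih).2 _ h
      rcases Relation.ReflTransGen.cases_tail h with h1 | ⟨u, hu, he⟩
      · exact hpne h1.symm
      · exact (hS2 u (hReachS u hu)).1 he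

-- forward reachability in A's g2 = backward reachability in B's rg2 (same item list, nodup keys)
theorem pvReachRev (node : String) (l : List (String × List String))
    (hnd : (l.map Prod.fst).Nodup) (p s : String) :
    pvReach (pvRev node l) s p ↔
      pvReach (l.foldl (fun acc kv => if kv.1 == node then acc
        else acc.insert kv.1 (kv.2.filter (fun v => v != node))) (PySem.Dict.mk [])) p s := by
  have hrel : pvEdge (pvRev node l) =
      Function.swap (pvEdge (l.foldl (fun acc kv => if kv.1 == node then acc
        else acc.insert kv.1 (kv.2.filter (fun v => v != node))) (PySem.Dict.mk []))) := by
    funext a b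
    apply propext
    rw [pvRevEdge node l a b]
    exact (pvG2Edge node l hnd b a).symm
  unfold pvReach
  rw [hrel]
  exact Relation.reflTransGen_swap

-- ===== VERDICT (by name: the statement is the Claim_ definition above) =====
theorem is_load_bearing_spec : Claim_equal_is_load_bearing := by
  intro node g rg _ hpre
  unfold Spec_is_load_bearing is_load_bearing is_load_bearing_alt
  by_cases hc : (((PySem.Dict.mk rg).getD node []).isEmpty
      || ((PySem.Dict.mk g : PySem.Dict String (List String)).getD node []).isEmpty) = true
  · simp only [hc, if_true]
  · rw [if_neg hc, if_neg hc]
    have hnd : (((PySem.Dict.mk g : PySem.Dict String (List String)).items).map Prod.fst).Nodup := hpre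
    have hpt : ∀ p s,
        (!(pvReachable ((PySem.Dict.mk g : PySem.Dict String (List String)).items.foldl
            (fun acc kv => if kv.1 == node then acc
              else acc.insert kv.1 (kv.2.filter (fun v => v != node))) (PySem.Dict.mk []))
          p s none)) = true ↔
        (!(PySem.Set.contains (pvDfsLoop (pvRev node ((PySem.Dict.mk g : PySem.Dict String (List String)).items))
            (PySem.Set.add PySem.Set.empty s) [s]) p)) = true := by
      intro p s
      rw [Bool.not_eq_eq_eq_not, Bool.not_eq_eq_eq_not, Bool.not_true, Bool.eq_false_iff,
        Bool.eq_false_iff, not_iff_not, pvReachableIff, PySem.Set.contains_iff, pvDfsLoopReach,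
        pvReachRev node _ hnd p s]
    rw [Bool.eq_iff_iff]
    simp only [List.any_eq_true]
    constructor
    · rintro ⟨p, hp, s, hs, h⟩
      exact ⟨s, hs, p, hp, (hpt p s).mp h⟩
    · rintro ⟨s, hs, p, hp, h⟩
      exact ⟨p, hp, s, hs, (hpt p s).mpr h⟩
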